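-- pv_equiv track=rewrite | github.com/thaheer-uzamaki/Code | Alphabet soup.py | alphabet_soup
-- ===== SOURCE A (Python) =====
-- def alphabet_soup(string):
--     res=[]
--     for char in string.lower():
--         res.append(char)
--     a=sorted(res)
--     b=''.join(a)
--     token='abcd'
--     result=b+token
--     res_list=list(result)
--     for i in range(3,len(result),4):
--         res_list[i]='-'
--     result=''.join(res_list)
--     return result
-- ===== SOURCE B (Python) =====
-- def alphabet_soup(string):
--     counts = {}
--     for ch in string.lower():
--         counts[ch] = counts.get(ch, 0) + 1
--     parts = []
--     for ch in sorted(counts):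
--         parts.append(ch * counts[ch])
--     s = ''.join(parts) + 'abcd'
--     out = []
--     for i in range(0, len(s), 4):
--         chunk = s[i:i + 4]
--         if len(chunk) == 4:
--             out.append(chunk[:3] + '-')
--         else:
--             out.append(chunk)
--     return ''.join(out)
-- ===== Notes on version B (the rewrite author's own statement) =====
-- stated objective: alternative
-- what changed: B builds a per-character frequency dict and expands sorted keys by their counts instead of sorting the full character list, and forms the dashes by walking the string in chunks of four (first three chars + '-') instead of index-assignment over range(3, len, 4).
import Mathlib
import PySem

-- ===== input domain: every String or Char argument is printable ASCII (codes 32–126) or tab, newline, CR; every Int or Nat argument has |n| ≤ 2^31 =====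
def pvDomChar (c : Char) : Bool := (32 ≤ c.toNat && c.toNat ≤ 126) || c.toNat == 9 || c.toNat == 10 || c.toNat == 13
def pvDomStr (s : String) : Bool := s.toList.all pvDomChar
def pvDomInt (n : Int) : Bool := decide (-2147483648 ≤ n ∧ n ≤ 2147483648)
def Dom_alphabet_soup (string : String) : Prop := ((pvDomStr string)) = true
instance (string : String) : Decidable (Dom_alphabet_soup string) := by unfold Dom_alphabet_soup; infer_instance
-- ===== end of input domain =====

-- B replaces A's sort-the-full-character-list + index-assignment dash loop by a frequency-dict
-- expansion over sorted keys and a chunk-of-four walk (objective: alternative, same cost).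

-- ===== PORT A =====
-- Strings are handled as their character lists: ''.join(a) and b + 'abcd' are list concatenation (exact).
def alphabet_soup (string : String) : String :=
  -- res=[]; for char in string.lower(): res.append(char)
  let res : List Char := (PySem.Str.lower string).toList.foldl (fun acc c => acc ++ [c]) []
  -- a=sorted(res); b=''.join(a); result=b+'abcd'; res_list=list(result)
  let a := PySem.List.sorted res (fun x => x) false
  let result := a ++ ['a', 'b', 'c', 'd']
  -- for i in range(3,len(result),4): res_list[i]='-'   (i always in range, so pySetD is exact)
  let res_list := (PySem.List.pyRange 3 (PySem.List.len result) 4).foldl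
      (fun t i => PySem.List.pySetD t i '-') result
  String.mk res_list

-- ===== PORT B =====
-- the chunk-of-four walk of Source B: a full chunk becomes its first three chars plus '-', a short trailing chunk is kept
def altDash : List Char → List Char
  | a :: b :: c :: _ :: t => a :: b :: c :: '-' :: altDash t
  | [] => []
  | [a] => [a]
  | [a, b] => [a, b]
  | [a, b, c] => [a, b, c]

def alphabet_soup_alt (string : String) : String :=
  -- counts = {}; for ch in string.lower(): counts[ch] = counts.get(ch, 0) + 1
  let counts := (PySem.Str.lower string).toList.foldl
      (fun d ch => d.insert ch (d.getD ch 0 + 1)) PySem.Dict.empty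
  -- parts = []; for ch in sorted(counts): parts.append(ch * counts[ch])
  let parts := (PySem.List.sorted counts.keys (fun x => x) false).foldl
      (fun acc ch => acc ++ PySem.List.pyRepeat [ch] (counts.getD ch 0)) ([] : List Char)
  -- s = ''.join(parts) + 'abcd'; chunk-of-four walk; ''.join(out)
  String.mk (altDash (parts ++ ['a', 'b', 'c', 'd']))

-- ===== PRECONDITION & SPEC =====
def Spec_alphabet_soup (string : String) (out : String) : Prop := out = alphabet_soup_alt string
instance (string : String) (out : String) : Decidable (Spec_alphabet_soup string out) := by unfold Spec_alphabet_soup; infer_instance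

-- ===== CLAIM (what is proved, stated in full; the proofs are below) =====
def Claim_equal_alphabet_soup : Prop := ∀ (string : String), Dom_alphabet_soup string → Spec_alphabet_soup string (alphabet_soup string)

-- ===== LEMMAS AND PROOFS =====

-- expansion of a key list by multiplicities in xs (the shape of B's parts loop)
def pvExpand (ks xs : List Char) : List Char := ks.flatMap (fun c => List.replicate (xs.count c) c)

theorem pvMem_expand {ks xs : List Char} {b : Char} (h : b ∈ pvExpand ks xs) : b ∈ ks := by
  simp only [pvExpand, List.mem_flatMap] at h
  obtain ⟨k, hk, hb⟩ := h
  rwa [List.eq_of_mem_replicate hb]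

theorem pvCount_expand (ks xs : List Char) (a : Char) (h : ks.Nodup) :
    (pvExpand ks xs).count a = if a ∈ ks then xs.count a else 0 := by
  induction ks with
  | nil => simp [pvExpand]
  | cons k ks ih =>
    rcases List.nodup_cons.mp h with ⟨hk, hnd⟩
    simp only [pvExpand, List.flatMap_cons, List.count_append, List.count_replicate] at *
    rcases eq_or_ne a k with rfl | hne
    · simp [ih hnd, hk]
    · simp [Ne.symm hne, ih hnd, hne]

theorem pvPerm_expand (ks xs : List Char) (h : ks.Nodup) (hm : ∀ a, a ∈ ks ↔ a ∈ xs) :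
    (pvExpand ks xs).Perm xs := by
  refine List.perm_iff_count.mpr fun a => ?_
  rw [pvCount_expand ks xs a h]
  by_cases ha : a ∈ ks
  · simp [ha]
  · simp [ha, List.count_eq_zero.mpr (fun hx => ha ((hm a).mpr hx))]

theorem pvPairwise_expand (ks xs : List Char) (h : ks.Pairwise (· < ·)) :
    (pvExpand ks xs).Pairwise (· ≤ ·) := by
  induction ks with
  | nil => simp [pvExpand]
  | cons k ks ih =>
    rcases List.pairwise_cons.mp h with ⟨hk, hpw⟩
    simp only [pvExpand, List.flatMap_cons]
    refine List.pairwise_append.mpr ⟨?_, ih hpw, ?_⟩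
    · exact List.pairwise_replicate.mpr (Or.inr le_rfl)
    · intro a ha b hb
      rw [List.eq_of_mem_replicate ha]
      exact le_of_lt (hk _ (pvMem_expand hb))

-- B's sorted-keys-times-counts expansion IS sorted(chars)
theorem pvSorted_eq_expand (cs : List Char) :
    PySem.List.sorted cs (fun x => x) false
      = pvExpand (PySem.List.sorted (PySem.Set.ofList cs) (fun x => x) false) cs := by
  have hlt := PySem.List.sorted_ofList_pairwise_lt (κ := Char) cs
  have hnd : (PySem.List.sorted (PySem.Set.ofList cs) (fun x => x) false).Nodup :=
    hlt.imp ne_of_lt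
  refine PySem.List.sorted_id_eq_of_perm_of_pairwise _ _ ?_ ?_
  · refine pvPerm_expand _ _ hnd fun a => ?_
    rw [PySem.List.mem_sorted, PySem.Set.mem_ofList]
  · exact pvPairwise_expand _ _ hlt

theorem pvSetfold_getElem? (idx : List Int) (l : List Char) (j : Nat)
    (hnn : ∀ i ∈ idx, 0 ≤ i) :
    (idx.foldl (fun t i => PySem.List.pySetD t i '-') l)[j]?
      = if (j : Int) ∈ idx ∧ j < l.length then some '-' else l[j]? := by
  induction idx generalizing l with
  | nil => simp
  | cons i is ih =>
    have hi : 0 ≤ i := hnn i (by simp)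
    rw [List.foldl_cons, ih _ (fun x hx => hnn x (by simp [hx])),
        PySem.List.pySetD_of_nonneg _ _ hi]
    simp only [List.length_set, List.getElem?_set, List.mem_cons]
    by_cases hji : (j : Int) = i
    · have hjt : i.toNat = j := by omega
      by_cases hlen : j < l.length
      · simp [hji, hjt, hlen]
      · have : ¬ j < l.length ∧ l[j]? = none := ⟨hlen, List.getElem?_eq_none (by omega)⟩
        simp [hji, hjt, hlen]
    · have hjt : ¬ i.toNat = j := by omega
      simp only [hjt, if_false]
      by_cases hjs : (j : Int) ∈ is <;> simp [hjs, hji]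

theorem pvAltDash_getElem? (l : List Char) (j : Nat) :
    (altDash l)[j]? = if j % 4 = 3 ∧ j < l.length then some '-' else l[j]? := by
  induction l using altDash.induct generalizing j with
  | case1 a b c d t ih =>
    rcases j with _ | _ | _ | _ | j
    · simp [altDash]
    · simp [altDash]
    · simp [altDash]
    · simp [altDash]
    · have h4 : (j + 4) % 4 = j % 4 := by omega
      simp only [altDash, List.getElem?_cons_succ, ih j, List.length_cons, h4]
      by_cases hc : j % 4 = 3 ∧ j < t.length
      · simp [hc.1, hc.2]
      · rw [if_neg hc, if_neg (show ¬ (j % 4 = 3 ∧ j + 1 + 1 + 1 + 1 < t.length + 1 + 1 + 1 + 1) by omega)]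
  | case2 => simp [altDash]
  | case3 a => rcases j with _ | _ | j <;> simp [altDash]
  | case4 a b => rcases j with _ | _ | _ | j <;> simp [altDash]
  | case5 a b c => rcases j with _ | _ | _ | _ | j <;> simp [altDash]

-- A's index-assignment loop over range(3, len, 4) IS the chunk-of-four walk
theorem pvDash_eq (l : List Char) :
    (PySem.List.pyRange 3 (PySem.List.len l) 4).foldl (fun t i => PySem.List.pySetD t i '-') l
      = altDash l := by
  have hmem : ∀ i, i ∈ PySem.List.pyRange 3 (PySem.List.len l) 4 ↔
      3 ≤ i ∧ i < (l.length : Int) ∧ (4 : Int) ∣ i - 3 := by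
    intro i
    simpa [PySem.List.len] using
      PySem.List.mem_pyRange_iff_of_pos (a := 3) (b := PySem.List.len l) (s := 4) (by norm_num) i
  apply List.ext_getElem?
  intro j
  rw [pvSetfold_getElem? _ _ _ (fun i hi => by have := (hmem i).mp hi; omega),
      pvAltDash_getElem?]
  congr 1
  simp only [hmem, eq_iff_iff]
  constructor
  · rintro ⟨⟨_, hlt, hdvd⟩, hj⟩; exact ⟨by omega, hj⟩
  · rintro ⟨hm, hj⟩; exact ⟨⟨by omega, by omega, by omega⟩, hj⟩

theorem pvParts_eq (cs : List Char) :
    (PySem.List.sorted (PySem.Set.ofList cs) (fun x => x) false).foldl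
        (fun acc ch => acc ++ PySem.List.pyRepeat [ch] ((PySem.Dict.counter cs).getD ch 0)) []
      = PySem.List.sorted cs (fun x => x) false := by
  rw [PySem.List.foldl_append_eq_flatMap, List.nil_append]
  simp only [PySem.List.pyRepeat_singleton, PySem.Dict.getD_counter, Int.toNat_natCast]
  exact (pvSorted_eq_expand cs).symm

-- ===== VERDICT (by name: the statement is the Claim_ definition above) =====
theorem alphabet_soup_spec : Claim_equal_alphabet_soup := by
  intro string _
  unfold Spec_alphabet_soup alphabet_soup alphabet_soup_alt
  simp only [PySem.List.foldl_append_singleton_eq_self, List.nil_append,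
    PySem.Dict.foldl_insert_getD_add_one_eq_counter, PySem.Dict.keys_counter]
  rw [pvDash_eq, pvParts_eq]
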